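-- pv_equiv track=rewrite | github.com/ZestyZeke/project-euler | problem4/python-solution/p4.py | set_bounds
-- ===== SOURCE A (Python) =====
-- def set_bounds(digits):
--     lower = 1
--     upper = 1
--     for i in range(1, digits):
--         lower *= 10
--     for i in range(0, digits):
--         upper *= 10
--     bounds = [lower, upper]
--     return bounds
-- ===== SOURCE B (Python) =====
-- def set_bounds(digits):
--     return [10 ** max(digits - 1, 0), 10 ** max(digits, 0)]
-- ===== Notes on version B (the rewrite author's own statement) =====
-- stated objective: simpler
-- what changed: Replaced the two linear multiply-accumulate loops with closed-form exponentiation of the base to the (clamped) digit counts.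
import Mathlib
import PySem

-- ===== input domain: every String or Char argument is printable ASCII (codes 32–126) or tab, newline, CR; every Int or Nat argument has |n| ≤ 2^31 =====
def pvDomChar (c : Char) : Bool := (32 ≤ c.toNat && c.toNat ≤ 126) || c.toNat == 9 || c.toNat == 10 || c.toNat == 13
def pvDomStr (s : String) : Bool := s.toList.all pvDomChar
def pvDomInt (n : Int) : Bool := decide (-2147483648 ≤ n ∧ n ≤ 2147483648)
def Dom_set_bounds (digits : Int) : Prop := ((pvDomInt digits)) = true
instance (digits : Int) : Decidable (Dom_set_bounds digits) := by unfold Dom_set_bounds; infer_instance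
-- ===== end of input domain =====

-- B replaces the two multiply-accumulate loops with closed-form exponentiation (simpler).

-- ===== PORT A =====
def set_bounds (digits : Int) : List Int :=
  let lower : Int := 1
  let upper : Int := 1
  let lower := (PySem.List.pyRange 1 digits 1).foldl (fun acc _ => acc * 10) lower
  let upper := (PySem.List.pyRange 0 digits 1).foldl (fun acc _ => acc * 10) upper
  [lower, upper]

-- ===== PORT B =====
def set_bounds_alt (digits : Int) : List Int :=
  [(10 : Int) ^ (max (digits - 1) 0).toNat, (10 : Int) ^ (max digits 0).toNat]

-- ===== PRECONDITION & SPEC =====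
def Spec_set_bounds (digits : Int) (out : List Int) : Prop := out = set_bounds_alt digits
instance (digits : Int) (out : List Int) : Decidable (Spec_set_bounds digits out) := by unfold Spec_set_bounds; infer_instance

-- ===== CLAIM (what is proved, stated in full; the proofs are below) =====
def Claim_equal_set_bounds : Prop := ∀ (digits : Int), Dom_set_bounds digits → Spec_set_bounds digits (set_bounds digits)

-- ===== LEMMAS AND PROOFS =====
theorem pv_foldl_mul_ten (l : List Int) (c : Int) :
    l.foldl (fun acc _ => acc * 10) c = c * 10 ^ l.length := by
  induction l generalizing c with
  | nil => simp
  | cons x xs ih => simp [List.foldl, ih, pow_succ]; ring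

-- ===== VERDICT (by name: the statement is the Claim_ definition above) =====
theorem set_bounds_spec : Claim_equal_set_bounds := by
  intro digits _
  unfold Spec_set_bounds set_bounds set_bounds_alt
  simp only [pv_foldl_mul_ten, PySem.List.length_pyRange_one, one_mul]
  have h1 : (digits - 1).toNat = (max (digits - 1) 0).toNat := by omega
  have h2 : (digits - 0).toNat = (max digits 0).toNat := by omega
  rw [h1, h2]
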